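-- pv_equiv track=rewrite | github.com/JDLewis4313/genius_edtech | apps/mentari/services/nl_enhancer.py | _identify_help_type
-- ===== SOURCE A (Python) =====
-- def _identify_help_type(message: str) -> str:
--     """Identify what type of help is needed"""
--     if any(word in message for word in ['explain', 'understand', 'what is', 'how does']):
--         return 'conceptual'
--     elif any(word in message for word in ['solve', 'calculate', 'find', 'answer']):
--         return 'procedural'
--     elif any(word in message for word in ['example', 'show me', 'demonstrate']):
--         return 'example_based'
--     elif any(word in message for word in ['check', 'correct', 'right', 'wrong']):
--         return 'verification'
--     else:
--         return 'general'
-- ===== SOURCE B (Python) =====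
-- # Different algorithm: one flat pass over (keyword, rank) pairs computing the
-- # MINIMUM priority rank of any matching keyword, then a single table lookup.
-- _KEYWORDS = [
--     ('explain', 0), ('understand', 0), ('what is', 0), ('how does', 0),
--     ('solve', 1), ('calculate', 1), ('find', 1), ('answer', 1),
--     ('example', 2), ('show me', 2), ('demonstrate', 2),
--     ('check', 3), ('correct', 3), ('right', 3), ('wrong', 3),
-- ]
-- _CATEGORIES = ['conceptual', 'procedural', 'example_based', 'verification', 'general']
--
-- def _identify_help_type(message: str) -> str:
--     """Identify what type of help is needed (min-rank accumulator)."""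
--     best = 4
--     for word, rank in _KEYWORDS:
--         if rank < best and word in message:
--             best = rank
--     return _CATEGORIES[best]
-- ===== Notes on version B (the rewrite author's own statement) =====
-- stated objective: alternative
-- what changed: Instead of four sequential any()-branch tests with early returns, B makes one flat pass over all (keyword, rank) pairs maintaining a minimum-rank accumulator, then maps the final rank to its category by a single table lookup.
import Mathlib
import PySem

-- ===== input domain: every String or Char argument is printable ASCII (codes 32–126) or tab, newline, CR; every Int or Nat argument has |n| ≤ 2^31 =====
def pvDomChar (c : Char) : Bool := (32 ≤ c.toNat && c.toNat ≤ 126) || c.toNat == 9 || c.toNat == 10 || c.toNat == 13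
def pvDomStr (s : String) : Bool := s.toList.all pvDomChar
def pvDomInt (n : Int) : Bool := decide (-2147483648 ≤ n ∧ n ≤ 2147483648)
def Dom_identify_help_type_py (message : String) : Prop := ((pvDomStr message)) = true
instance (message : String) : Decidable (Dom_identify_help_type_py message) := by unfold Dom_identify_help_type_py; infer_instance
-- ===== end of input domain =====

-- B replaces A's four elif any()-branches by one flat min-rank fold over (keyword, rank) pairs plus a final table lookup (alternative decomposition, same cost).


-- ===== PORT A =====
def identify_help_type_py (message : String) : String :=
  if (["explain", "understand", "what is", "how does"].any fun word => PySem.Str.isIn word message) then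
    "conceptual"
  else if (["solve", "calculate", "find", "answer"].any fun word => PySem.Str.isIn word message) then
    "procedural"
  else if (["example", "show me", "demonstrate"].any fun word => PySem.Str.isIn word message) then
    "example_based"
  else if (["check", "correct", "right", "wrong"].any fun word => PySem.Str.isIn word message) then
    "verification"
  else
    "general"

-- ===== PORT B =====
def pvKeywords : List (String × Nat) :=
  [("explain", 0), ("understand", 0), ("what is", 0), ("how does", 0),
   ("solve", 1), ("calculate", 1), ("find", 1), ("answer", 1),
   ("example", 2), ("show me", 2), ("demonstrate", 2),
   ("check", 3), ("correct", 3), ("right", 3), ("wrong", 3)]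

def pvCategories : List String :=
  ["conceptual", "procedural", "example_based", "verification", "general"]

-- the for-loop: fold keeping the minimum rank seen; final _CATEGORIES[best]
-- (the index `best` is always ≤ 4, so Python's list indexing never raises; getD's default is unreachable)
def identify_help_type_py_alt (message : String) : String :=
  pvCategories.getD
    (pvKeywords.foldl
      (fun best p => if p.2 < best && PySem.Str.isIn p.1 message then p.2 else best) 4)
    "general"

-- ===== PRECONDITION & SPEC =====
def Spec_identify_help_type_py (message : String) (out : String) : Prop := out = identify_help_type_py_alt message
instance (message : String) (out : String) : Decidable (Spec_identify_help_type_py message out) := by unfold Spec_identify_help_type_py; infer_instance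

-- ===== CLAIM (what is proved, stated in full; the proofs are below) =====
def Claim_equal_identify_help_type_py : Prop := ∀ (message : String), Dom_identify_help_type_py message → Spec_identify_help_type_py message (identify_help_type_py message)

-- ===== LEMMAS AND PROOFS =====

-- folding a group of keywords all of rank r from accumulator b:
-- the result is r if r < b and some keyword of the group matches q, else b.
theorem pv_foldl_rank (q : String → Bool) (r : Nat) :
    ∀ (ws : List String) (b : Nat),
      List.foldl (fun best p => if p.2 < best && q p.1 then p.2 else best) b
        (ws.map (fun w => (w, r)))
      = if r < b && ws.any q then r else b := by
  intro ws
  induction ws with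
  | nil => intro b; simp
  | cons w ws ih =>
    intro b
    simp only [List.map_cons, List.foldl_cons, List.any_cons, ih]
    by_cases hq : q w = true <;> by_cases hr : r < b <;>
      simp [hq, hr]

theorem identify_help_type_py_spec : Claim_equal_identify_help_type_py := by
  intro message _
  unfold Spec_identify_help_type_py identify_help_type_py identify_help_type_py_alt
  have hk : pvKeywords =
      (["explain", "understand", "what is", "how does"].map (fun w => (w, 0)))
      ++ (["solve", "calculate", "find", "answer"].map (fun w => (w, 1)))
      ++ (["example", "show me", "demonstrate"].map (fun w => (w, 2)))
      ++ (["check", "correct", "right", "wrong"].map (fun w => (w, 3))) := rfl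
  rw [hk]
  simp only [List.foldl_append]
  rw [pv_foldl_rank (fun w => PySem.Str.isIn w message), pv_foldl_rank (fun w => PySem.Str.isIn w message), pv_foldl_rank (fun w => PySem.Str.isIn w message), pv_foldl_rank (fun w => PySem.Str.isIn w message)]
  cases h0 : (["explain", "understand", "what is", "how does"].any fun word => PySem.Str.isIn word message) <;>
  cases h1 : (["solve", "calculate", "find", "answer"].any fun word => PySem.Str.isIn word message) <;>
  cases h2 : (["example", "show me", "demonstrate"].any fun word => PySem.Str.isIn word message) <;>
  cases h3 : (["check", "correct", "right", "wrong"].any fun word => PySem.Str.isIn word message) <;>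
    simp [h0, h1, h2, h3, pvCategories]
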